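-- pv_equiv track=rewrite | github.com/muhsina26/Computer-Graphics | test2.py | midPointCircle
-- ===== SOURCE A (Python) =====
-- def midPointCircle(xc, yc, r):
--     points = []
--     x = 0
--     y = r
--     d = 1 - r
--
--     while x <= y:
--         points.extend([
--             (xc + x, yc + y),
--             (xc - x, yc + y),
--             (xc + x, yc - y),
--             (xc - x, yc - y),
--             (xc + y, yc + x),
--             (xc - y, yc + x),
--             (xc + y, yc - x),
--             (xc - y, yc - x)
--         ])
--         if d < 0:
--             d += 2 * x + 3
--         else:
--             d += 2 * (x - y) + 5
--             y -= 1
--         x += 1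
--     return points
-- ===== SOURCE B (Python) =====
-- def nearest_sqrt(n):
--     # least y >= 0 with y*y + y >= n; equals round(sqrt(n)) for n >= 0
--     lo, hi = 0, n + 1
--     while lo + 1 < hi:
--         mid = (lo + hi) // 2
--         if mid * mid <= n:
--             lo = mid
--         else:
--             hi = mid
--     return lo + 1 if n > lo * (lo + 1) else lo
--
--
-- def midPointCircle(xc, yc, r):
--     points = []
--     for x in range(r + 1):
--         y = nearest_sqrt(r * r - x * x)
--         if x > y:
--             break
--         points.extend([
--             (xc + x, yc + y),
--             (xc - x, yc + y),
--             (xc + x, yc - y),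
--             (xc - x, yc - y),
--             (xc + y, yc + x),
--             (xc - y, yc + x),
--             (xc + y, yc - x),
--             (xc - y, yc - x)
--         ])
--     return points
-- ===== Notes on version B (the rewrite author's own statement) =====
-- stated objective: alternative
-- what changed: Replaces the incremental midpoint decision variable d with a direct per-column closed form: for each x in range(r+1), y is computed as the nearest integer to sqrt(r*r-x*x) via an exact integer binary search, stopping when x > y.
import Mathlib
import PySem

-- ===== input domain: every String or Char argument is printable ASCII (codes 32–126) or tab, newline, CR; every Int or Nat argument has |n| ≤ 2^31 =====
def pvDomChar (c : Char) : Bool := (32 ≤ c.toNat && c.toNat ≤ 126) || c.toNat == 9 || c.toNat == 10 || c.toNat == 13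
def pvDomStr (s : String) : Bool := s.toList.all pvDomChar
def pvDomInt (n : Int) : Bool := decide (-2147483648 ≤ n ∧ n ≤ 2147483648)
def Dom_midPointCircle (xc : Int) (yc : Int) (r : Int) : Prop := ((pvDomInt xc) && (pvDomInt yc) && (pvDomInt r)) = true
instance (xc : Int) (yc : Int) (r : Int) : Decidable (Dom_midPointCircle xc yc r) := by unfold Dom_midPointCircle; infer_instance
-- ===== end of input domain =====

-- B replaces A's incremental decision variable with a per-column closed form
-- (y = nearest integer to sqrt(r^2-x^2), computed by exact integer binary search);
-- objective: alternative algorithm, same exact output.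

-- ===== PORT A =====
-- the while loop of A, state (x, y, d), accumulator points
-- (fuel is only a structural termination guard; the caller passes more fuel than iterations)
def pvLoopA (xc yc r : Int) : Nat → Int → Int → Int → List (Int × Int) → List (Int × Int)
  | 0, _, _, _, points => points
  | fuel + 1, x, y, d, points =>
    if x ≤ y then
      let points := points ++
        [(xc + x, yc + y), (xc - x, yc + y), (xc + x, yc - y), (xc - x, yc - y),
         (xc + y, yc + x), (xc - y, yc + x), (xc + y, yc - x), (xc - y, yc - x)]
      if d < 0 then pvLoopA xc yc r fuel (x + 1) y (d + 2 * x + 3) points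
      else pvLoopA xc yc r fuel (x + 1) (y - 1) (d + 2 * (x - y) + 5) points
    else points

def midPointCircle (xc : Int) (yc : Int) (r : Int) : List (Int × Int) :=
  pvLoopA xc yc r ((r + 1).toNat + 1) 0 r (1 - r) []

-- ===== PORT B =====
-- the while loop of nearest_sqrt: binary search for the integer square root
-- (fuel is only a structural termination guard; the caller passes more fuel than iterations)
def pvBsearch (n : Int) : Nat → Int → Int → Int
  | 0, lo, _ => lo
  | fuel + 1, lo, hi =>
    if lo + 1 < hi then
      let mid := PySem.Int.floordiv (lo + hi) 2
      if mid * mid ≤ n then pvBsearch n fuel mid hi else pvBsearch n fuel lo mid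
    else lo

-- nearest_sqrt(n): least y ≥ 0 with y*y + y ≥ n (= round(sqrt n) for n ≥ 0)
def pvNearestSqrt (n : Int) : Int :=
  let lo := pvBsearch n (n + 1).toNat 0 (n + 1)
  if n > lo * (lo + 1) then lo + 1 else lo

-- the for-loop of B over range(r+1), with break
def pvLoopB (xc yc r : Int) : List Int → List (Int × Int) → List (Int × Int)
  | [], points => points
  | x :: rest, points =>
    let y := pvNearestSqrt (r * r - x * x)
    if x > y then points
    else pvLoopB xc yc r rest (points ++
      [(xc + x, yc + y), (xc - x, yc + y), (xc + x, yc - y), (xc - x, yc - y),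
       (xc + y, yc + x), (xc - y, yc + x), (xc + y, yc - x), (xc - y, yc - x)])

def midPointCircle_alt (xc : Int) (yc : Int) (r : Int) : List (Int × Int) :=
  pvLoopB xc yc r (PySem.List.pyRange 0 (r + 1) 1) []

-- ===== PRECONDITION & SPEC =====
def Spec_midPointCircle (xc : Int) (yc : Int) (r : Int) (out : List (Int × Int)) : Prop := out = midPointCircle_alt xc yc r
instance (xc : Int) (yc : Int) (r : Int) (out : List (Int × Int)) : Decidable (Spec_midPointCircle xc yc r out) := by unfold Spec_midPointCircle; infer_instance

-- ===== CLAIM (what is proved, stated in full; the proofs are below) =====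
def Claim_equal_midPointCircle : Prop := ∀ (xc : Int) (yc : Int) (r : Int), Dom_midPointCircle xc yc r → Spec_midPointCircle xc yc r (midPointCircle xc yc r)

-- ===== LEMMAS AND PROOFS =====

-- a*a - a is monotone on nonnegative integers
theorem pvSqSubMono (a b : Int) (h0 : 0 ≤ a) (h : a ≤ b) : a * a - a ≤ b * b - b := by
  rcases eq_or_lt_of_le h with rfl | h1
  · exact le_rfl
  · nlinarith [mul_nonneg (by omega : (0:Int) ≤ b - a) (by omega : (0:Int) ≤ a + b - 1)]

-- midpoint bound of the binary search
theorem pvMidBounds (lo hi : Int) (h : lo + 1 < hi) :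
    lo < PySem.Int.floordiv (lo + hi) 2 ∧ PySem.Int.floordiv (lo + hi) 2 < hi := by
  simp only [PySem.Int.floordiv, Int.fdiv_eq_ediv]
  norm_num
  omega

-- binary search invariant: with enough fuel it returns the floor square root
theorem pvBsearch_spec (n : Int) : ∀ (fuel : Nat) (lo hi : Int), (hi - lo).toNat ≤ fuel →
    0 ≤ lo → lo * lo ≤ n → n < hi * hi → lo < hi →
    0 ≤ pvBsearch n fuel lo hi ∧ pvBsearch n fuel lo hi * pvBsearch n fuel lo hi ≤ n ∧
      n < (pvBsearch n fuel lo hi + 1) * (pvBsearch n fuel lo hi + 1) := by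
  intro fuel
  induction fuel with
  | zero => intro lo hi hf h0 hlo hhi hlt; omega
  | succ fuel ih =>
    intro lo hi hf h0 hlo hhi hlt
    simp only [pvBsearch]
    split_ifs with h1 h2
    · have hm := pvMidBounds lo hi h1
      exact ih _ hi (by omega) (by omega) h2 hhi (by omega)
    · have hm := pvMidBounds lo hi h1
      exact ih lo _ (by omega) h0 hlo (by omega) (by omega)
    · have : hi = lo + 1 := by omega
      exact ⟨h0, hlo, by rw [this] at hhi; exact hhi⟩

-- characterization of pvNearestSqrt: Y ≥ 0, Y²-Y ≤ n ≤ Y²+Y, and Y least (Y = 0 ∨ Y²-Y < n)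
theorem pvNearestSqrt_spec (n : Int) (hn : 0 ≤ n) :
    0 ≤ pvNearestSqrt n ∧ pvNearestSqrt n * pvNearestSqrt n - pvNearestSqrt n ≤ n ∧
      n ≤ pvNearestSqrt n * pvNearestSqrt n + pvNearestSqrt n ∧
      (pvNearestSqrt n = 0 ∨ pvNearestSqrt n * pvNearestSqrt n - pvNearestSqrt n < n) := by
  obtain ⟨hk0, hk1, hk2⟩ := pvBsearch_spec n (n + 1).toNat 0 (n + 1) (by omega) le_rfl (by omega) (by nlinarith) (by omega)
  simp only [pvNearestSqrt]
  set k := pvBsearch n (n + 1).toNat 0 (n + 1) with hkdef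
  split_ifs with h
  · refine ⟨by omega, by nlinarith, by nlinarith, Or.inr (by nlinarith)⟩
  · refine ⟨hk0, by nlinarith, by nlinarith, ?_⟩
    rcases eq_or_lt_of_le hk0 with h0 | h0
    · exact Or.inl h0.symm
    · exact Or.inr (by nlinarith)

-- uniqueness of the characterization
theorem pvNearestUnique (n a b : Int) (ha0 : 0 ≤ a) (ha2 : n ≤ a * a + a)
    (ha3 : a = 0 ∨ a * a - a < n) (hb0 : 0 ≤ b) (hb2 : n ≤ b * b + b)
    (hb3 : b = 0 ∨ b * b - b < n) : a = b := by
  by_contra hne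
  rcases lt_or_gt_of_ne hne with h | h
  · have h2 : (a + 1) * (a + 1) - (a + 1) ≤ b * b - b := pvSqSubMono _ _ (by omega) (by omega)
    rcases hb3 with h3 | h3
    · omega
    · nlinarith
  · have h2 : (b + 1) * (b + 1) - (b + 1) ≤ a * a - a := pvSqSubMono _ _ (by omega) (by omega)
    rcases ha3 with h3 | h3
    · omega
    · nlinarith

-- A's loop never runs out of fuel: when the guard x > y (or fuel = 0) stops it, it returns the accumulator
theorem pvLoopA_stop (xc yc r : Int) (fuel : Nat) (x y d : Int) (acc : List (Int × Int))
    (h : ¬ x ≤ y) : pvLoopA xc yc r fuel x y d acc = acc := by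
  cases fuel with
  | zero => rfl
  | succ fuel => rw [pvLoopA, if_neg h]

-- main loop correspondence
set_option maxHeartbeats 1000000 in
theorem pvLoop_eq : ∀ (fuel : Nat) (xc yc r x y d : Int) (acc : List (Int × Int)),
    (y - x + 1).toNat ≤ fuel → 0 ≤ x → x ≤ y → 0 ≤ r →
    d = (x + 1) * (x + 1) + y * y - y - r * r →
    r * r - x * x ≤ y * y + y →
    (y = 0 ∨ y * y - y < r * r - x * x) →
    pvLoopA xc yc r fuel x y d acc = pvLoopB xc yc r (PySem.List.pyRange x (r + 1) 1) acc := by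
  intro fuel
  induction fuel with
  | zero => intro xc yc r x y d acc hf hx hxy hr hd hrem hleast; omega
  | succ fuel ih =>
    intro xc yc r x y d acc hf hx hxy hr hd hrem hleast
    have hyr : y ≤ r := by
      by_contra hc
      have h2 : (r + 1) * (r + 1) - (r + 1) ≤ y * y - y := pvSqSubMono _ _ (by omega) (by omega)
      rcases hleast with h3 | h3 <;> nlinarith
    have hxr : x ≤ r := le_trans hxy hyr
    have hrem0 : 0 ≤ r * r - x * x := by nlinarith
    rw [PySem.List.pyRange_one_cons (by omega)]
    have hY := pvNearestSqrt_spec (r * r - x * x) hrem0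
    have hYy : pvNearestSqrt (r * r - x * x) = y :=
      pvNearestUnique (r * r - x * x) _ y hY.1 hY.2.2.1 hY.2.2.2
        (by omega) hrem (by tauto)
    rw [pvLoopA, if_pos hxy, pvLoopB]
    simp only [hYy]
    rw [if_neg (by omega : ¬ x > y)]
    set acc' := acc ++
      [(xc + x, yc + y), (xc - x, yc + y), (xc + x, yc - y), (xc - x, yc - y),
       (xc + y, yc + x), (xc - y, yc + x), (xc + y, yc - x), (xc - y, yc - x)] with hacc'
    split_ifs with hdlt
    · -- d < 0 : keep y
      by_cases hcont : x + 1 ≤ y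
      · exact ih xc yc r (x + 1) y (d + 2 * x + 3) acc'
          (by omega) (by omega) hcont hr (by rw [hd]; ring) (by nlinarith) (Or.inr (by nlinarith))
      · -- y = x : A stops after this step, and so does B
        rw [pvLoopA_stop xc yc r fuel _ _ _ acc' (by omega)]
        by_cases hxe : x + 1 < r + 1
        · rw [PySem.List.pyRange_one_cons hxe, pvLoopB]
          have hrem0' : 0 ≤ r * r - (x + 1) * (x + 1) := by nlinarith
          have hY' := pvNearestSqrt_spec (r * r - (x + 1) * (x + 1)) hrem0'
          have hstop : x + 1 > pvNearestSqrt (r * r - (x + 1) * (x + 1)) := by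
            by_contra hc
            have h2 := pvSqSubMono (x + 1) (pvNearestSqrt (r * r - (x + 1) * (x + 1)))
              (by omega) (by omega)
            nlinarith [hY'.2.1]
          simp only [if_pos hstop]
        · rw [PySem.List.pyRange_one_eq_nil (by omega), pvLoopB]
    · -- d ≥ 0 : decrement y
      by_cases hcont : x + 1 ≤ y - 1
      · exact ih xc yc r (x + 1) (y - 1) (d + 2 * (x - y) + 5) acc'
          (by omega) (by omega) hcont hr (by rw [hd]; ring)
          (by nlinarith) (Or.inr (by rcases hleast with h | h <;> nlinarith))
      · -- y ≤ x + 1 : A stops after this step, and so does B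
        rw [pvLoopA_stop xc yc r fuel _ _ _ acc' (by omega)]
        by_cases hxe : x + 1 < r + 1
        · rw [PySem.List.pyRange_one_cons hxe, pvLoopB]
          have hrem0' : 0 ≤ r * r - (x + 1) * (x + 1) := by nlinarith
          have hY' := pvNearestSqrt_spec (r * r - (x + 1) * (x + 1)) hrem0'
          have hyb : y * y - y ≤ x * x + x := by
            have := pvSqSubMono y (x + 1) (by omega) (by omega)
            nlinarith
          have hstop : x + 1 > pvNearestSqrt (r * r - (x + 1) * (x + 1)) := by
            by_contra hc
            have h2 := pvSqSubMono (x + 1) (pvNearestSqrt (r * r - (x + 1) * (x + 1)))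
              (by omega) (by omega)
            rcases hY'.2.2.2 with h3 | h3
            · omega
            · nlinarith
          simp only [if_pos hstop]
        · rw [PySem.List.pyRange_one_eq_nil (by omega), pvLoopB]

-- ===== VERDICT (by name: the statement is the Claim_ definition above) =====
theorem midPointCircle_spec : Claim_equal_midPointCircle := by
  intro xc yc r _
  unfold Spec_midPointCircle midPointCircle midPointCircle_alt
  by_cases hr : 0 ≤ r
  · exact pvLoop_eq ((r + 1).toNat + 1) xc yc r 0 r (1 - r) [] (by omega) le_rfl hr hr
      (by ring) (by nlinarith) (by rcases eq_or_lt_of_le hr with h | h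
                                   · exact Or.inl h.symm
                                   · exact Or.inr (by nlinarith))
  · rw [pvLoopA_stop xc yc r _ _ _ _ _ (by omega : ¬ (0:Int) ≤ r),
      PySem.List.pyRange_one_eq_nil (by omega), pvLoopB]
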